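-- pv_equiv track=rewrite | github.com/qops1981/advent-of-code-2019 | python/day_04/venus_password_cracking_p2.py | has_single_pair_dup
-- ===== SOURCE A (Python) =====
-- def has_single_pair_dup(evaluation):    # Looking for the exsistance of any sible dup
--     count = 0
--     for e in evaluation:
--         if e == True:
--             count += 1
--         elif e == False:
--             if count == 1:
--                 break
--             else:
--                 count = 0
--
--     return count == 1   # Need one single True value on its own to be valid
-- ===== SOURCE B (Python) =====
-- def has_single_pair_dup(evaluation):
--     # Build the lengths of all maximal runs of True, then test membership of 1.
--     counts = []
--     current = 0
--     for e in evaluation: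
--         if e == True:
--             current += 1
--         elif e == False:
--             counts.append(current)
--             current = 0
--     counts.append(current)
--     return 1 in counts
-- ===== Notes on version B (the rewrite author's own statement) =====
-- stated objective: alternative
-- what changed: Replaces A's early-breaking state machine with a full pass that collects all True-run lengths into a list and then tests membership of 1.
import Mathlib
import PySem

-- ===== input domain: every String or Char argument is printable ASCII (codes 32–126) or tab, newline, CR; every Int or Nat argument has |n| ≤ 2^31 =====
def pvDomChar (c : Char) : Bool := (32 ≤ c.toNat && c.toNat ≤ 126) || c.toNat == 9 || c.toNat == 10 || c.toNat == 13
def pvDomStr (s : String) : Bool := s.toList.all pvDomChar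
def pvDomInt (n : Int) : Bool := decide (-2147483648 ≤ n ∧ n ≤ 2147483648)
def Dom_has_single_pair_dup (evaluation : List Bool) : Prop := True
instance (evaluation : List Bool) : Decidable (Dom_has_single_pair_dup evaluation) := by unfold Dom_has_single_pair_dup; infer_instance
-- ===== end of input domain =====

-- B collects all True-run lengths then tests membership of 1, instead of A's early-breaking state machine; same return value (alternative decomposition).

-- ===== PORT A =====
-- A's loop with break: returns the final value of `count`
def pvALoop : List Bool → Int → Int
  | [], count => count
  | e :: rest, count =>
    if e then pvALoop rest (count + 1)
    else if count == 1 then count      -- break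
    else pvALoop rest 0

def has_single_pair_dup (evaluation : List Bool) : Bool :=
  pvALoop evaluation 0 == 1

-- ===== PORT B =====
-- B's loop: (counts, current) state; appends current whenever e is False
def pvBLoop : List Bool → Int → List Int → List Int
  | [], current, counts => counts ++ [current]
  | e :: rest, current, counts =>
    if e then pvBLoop rest (current + 1) counts
    else pvBLoop rest 0 (counts ++ [current])

def has_single_pair_dup_alt (evaluation : List Bool) : Bool :=
  decide ((1 : Int) ∈ pvBLoop evaluation 0 [])

-- ===== PRECONDITION & SPEC =====
def Spec_has_single_pair_dup (evaluation : List Bool) (out : Bool) : Prop := out = has_single_pair_dup_alt evaluation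
instance (evaluation : List Bool) (out : Bool) : Decidable (Spec_has_single_pair_dup evaluation out) := by unfold Spec_has_single_pair_dup; infer_instance

-- ===== CLAIM (what is proved, stated in full; the proofs are below) =====
def Claim_equal_has_single_pair_dup : Prop := ∀ (evaluation : List Bool), Dom_has_single_pair_dup evaluation → Spec_has_single_pair_dup evaluation (has_single_pair_dup evaluation)

-- ===== LEMMAS AND PROOFS =====

lemma pvBLoop_mem_iff (ev : List Bool) : ∀ (c : Int) (counts : List Int),
    ((1 : Int) ∈ pvBLoop ev c counts) ↔ (1 ∈ counts ∨ pvALoop ev c = 1) := by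
  induction ev with
  | nil =>
    intro c counts
    simp [pvBLoop, pvALoop, eq_comm]
  | cons e rest ih =>
    intro c counts
    cases e with
    | true =>
      simp only [pvBLoop, pvALoop, if_pos]
      exact ih (c + 1) counts
    | false =>
      simp only [pvBLoop, pvALoop, Bool.false_eq_true, if_false]
      by_cases hc : c = 1
      · subst hc
        simp only [beq_self_eq_true, if_true]
        rw [ih 0 (counts ++ [1])]
        simp
      · have hb : (c == 1) = false := by simpa using hc
        simp only [hb, Bool.false_eq_true, if_false]
        rw [ih 0 (counts ++ [c])]
        have h1 : ¬ (1 : Int) = c := fun h => hc h.symm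
        simp [h1]

-- ===== VERDICT (by name: the statement is the Claim_ definition above) =====
theorem has_single_pair_dup_spec : Claim_equal_has_single_pair_dup := by
  intro ev _
  unfold Spec_has_single_pair_dup has_single_pair_dup has_single_pair_dup_alt
  rw [Bool.eq_iff_iff]
  simp only [beq_iff_eq, decide_eq_true_eq, pvBLoop_mem_iff ev 0 []]
  simp
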